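-- pv_equiv track=rewrite | github.com/Amal-Joe-Manuel/Disaster_Intel | scorer.py | get_category_breakdown
-- ===== SOURCE A (Python) =====
-- def get_category_breakdown(detections: list[dict]) -> dict:
--     """
--     Returns count of detections per disaster category.
--     Useful for the dashboard to show breakdown by type.
--     Categories: structural, infrastructure, casualty, flood, debris, severity
--     """
--     breakdown = {
--         "structural": 0,
--         "infrastructure": 0,
--         "casualty": 0,
--         "flood": 0,
--         "debris": 0,
--         "severity": 0,
--     }
--     for det in detections:
--         cat = det.get("category", "debris")
--         if cat in breakdown:
--             breakdown[cat] += 1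
--     return breakdown
-- ===== SOURCE B (Python) =====
-- def get_category_breakdown(detections: list[dict]) -> dict:
--     return {
--         k: sum(1 for det in detections if det.get("category", "debris") == k)
--         for k in ("structural", "infrastructure", "casualty", "flood", "debris", "severity")
--     }
-- ===== Notes on version B (the rewrite author's own statement) =====
-- stated objective: idiomatic
-- what changed: A keeps a mutable six-key counter dict and increments guarded by a membership test in one loop; B builds the result directly as a dict comprehension over the six fixed keys, counting matching detections per key with sum(...), so no mutable accumulator or membership guard exists.
import Mathlib
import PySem

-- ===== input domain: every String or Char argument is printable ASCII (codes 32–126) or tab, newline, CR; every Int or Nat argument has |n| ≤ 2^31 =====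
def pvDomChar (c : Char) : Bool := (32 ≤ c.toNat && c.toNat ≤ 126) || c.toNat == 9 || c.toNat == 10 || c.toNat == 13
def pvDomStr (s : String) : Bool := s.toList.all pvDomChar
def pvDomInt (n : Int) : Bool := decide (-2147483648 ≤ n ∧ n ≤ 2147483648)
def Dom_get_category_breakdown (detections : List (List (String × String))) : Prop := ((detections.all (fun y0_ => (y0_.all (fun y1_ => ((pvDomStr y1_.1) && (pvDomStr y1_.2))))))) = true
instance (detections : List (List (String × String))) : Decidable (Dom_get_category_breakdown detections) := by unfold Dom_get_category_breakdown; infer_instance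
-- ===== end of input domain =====

-- B replaces A's single guarded-increment loop over a mutable counter dict by a per-key
-- count over the six fixed keys (idiomatic dict comprehension); same values, no speed claim.

-- ===== PORT A =====
-- helper shared by both ports: det.get("category", "debris") on the detection dict
def gcbCat (det : List (String × String)) : String :=
  (PySem.Dict.mk det).getD "category" "debris"

def get_category_breakdown (detections : List (List (String × String))) : List (String × Int) :=
  let breakdown : PySem.Dict String Int :=
    ((((((PySem.Dict.empty.insert "structural" 0).insert "infrastructure" 0).insert
        "casualty" 0).insert "flood" 0).insert "debris" 0).insert "severity" 0)
  (detections.foldl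
    (fun b det =>
      let cat := gcbCat det
      if b.contains cat then b.modify cat 0 (· + 1) else b)
    breakdown).items

-- ===== PORT B =====
def gcbKeys : List String :=
  ["structural", "infrastructure", "casualty", "flood", "debris", "severity"]

def get_category_breakdown_alt (detections : List (List (String × String))) : List (String × Int) :=
  gcbKeys.map (fun k =>
    (k, ((detections.countP (fun det => gcbCat det == k) : Nat) : Int)))

-- ===== PRECONDITION & SPEC =====
def Spec_get_category_breakdown (detections : List (List (String × String))) (out : List (String × Int)) : Prop := out = get_category_breakdown_alt detections
instance (detections : List (List (String × String))) (out : List (String × Int)) : Decidable (Spec_get_category_breakdown detections out) := by unfold Spec_get_category_breakdown; infer_instance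

-- ===== CLAIM (what is proved, stated in full; the proofs are below) =====
def Claim_equal_get_category_breakdown : Prop := ∀ (detections : List (List (String × String))), Dom_get_category_breakdown detections → Spec_get_category_breakdown detections (get_category_breakdown detections)

-- ===== LEMMAS AND PROOFS =====

def gcbStep (b : PySem.Dict String Int) (det : List (String × String)) : PySem.Dict String Int :=
  if b.contains (gcbCat det) then b.modify (gcbCat det) 0 (· + 1) else b

lemma gcbStep_keys (b : PySem.Dict String Int) (det : List (String × String)) :
    (gcbStep b det).keys = b.keys := by
  unfold gcbStep
  by_cases h : b.contains (gcbCat det) = true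
  · simp [h, PySem.Dict.keys_modify, PySem.Dict.keys_insert_of_contains]
  · simp [h]

lemma gcbFold_keys (l : List (List (String × String))) (b : PySem.Dict String Int) :
    (l.foldl gcbStep b).keys = b.keys := by
  induction l generalizing b with
  | nil => rfl
  | cons det l ih => simp [List.foldl_cons, ih, gcbStep_keys]

lemma gcbFold_getD (l : List (List (String × String))) (b : PySem.Dict String Int)
    (hk : b.keys = gcbKeys) (k : String) (hmem : k ∈ gcbKeys) :
    (l.foldl gcbStep b).getD k 0 = b.getD k 0 + (l.countP (fun det => gcbCat det == k) : Int) := by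
  induction l generalizing b with
  | nil => simp
  | cons det l ih =>
    rw [List.foldl_cons]
    have hkeys : (gcbStep b det).keys = gcbKeys := by rw [gcbStep_keys, hk]
    rw [ih (gcbStep b det) hkeys, List.countP_cons]
    have hc : b.contains (gcbCat det) = decide (gcbCat det ∈ gcbKeys) := by
      rw [PySem.Dict.contains_eq_decide_mem_keys, hk]
    unfold gcbStep
    by_cases hin : gcbCat det ∈ gcbKeys
    · rw [hc]
      simp only [hin, decide_true, if_true, PySem.Dict.getD_modify]
      by_cases hek : k = gcbCat det
      · simp [hek]; ring
      · have : ¬ (gcbCat det == k) = true := by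
          simp only [beq_iff_eq]; exact fun h => hek h.symm
        simp [hek, this]
    · rw [hc]
      have : ¬ (gcbCat det == k) = true := by
        simp only [beq_iff_eq]
        intro h; exact hin (h ▸ hmem)
      simp [hin, this]

-- ===== VERDICT (by name: the statement is the Claim_ definition above) =====
theorem get_category_breakdown_spec : Claim_equal_get_category_breakdown := by
  unfold Claim_equal_get_category_breakdown
  intro detections _
  unfold Spec_get_category_breakdown get_category_breakdown get_category_breakdown_alt
  set b0 : PySem.Dict String Int :=
    ((((((PySem.Dict.empty.insert "structural" 0).insert "infrastructure" 0).insert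
        "casualty" 0).insert "flood" 0).insert "debris" 0).insert "severity" 0) with hb0
  have hstep : (fun (b : PySem.Dict String Int) det =>
      let cat := gcbCat det
      if b.contains cat then b.modify cat 0 (· + 1) else b) = gcbStep := rfl
  rw [hstep]
  have hk0 : b0.keys = gcbKeys := by rw [hb0]; decide
  have hkeys : (detections.foldl gcbStep b0).keys = gcbKeys := by
    rw [gcbFold_keys, hk0]
  have hnd : (detections.foldl gcbStep b0).keys.Nodup := by
    rw [hkeys]; decide
  rw [PySem.Dict.items_eq_map_keys _ hnd 0, hkeys]
  apply List.map_congr_left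
  intro k hmem
  congr 1
  rw [gcbFold_getD detections b0 hk0 k hmem]
  have hz : b0.getD k 0 = 0 := by
    fin_cases hmem <;> (rw [hb0]; decide)
  rw [hz, zero_add]
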